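-- pv_equiv track=rewrite | github.com/LUCKYALI1/GFG_POD_SOLUTIONS | January_2026/06_max_xor_subarray_k.py.py | max_xor_sliding_window
-- ===== SOURCE A (Python) =====
-- def max_xor_sliding_window(arr, k):
--     n = len(arr)
--     if k > n:
--         return 0
--
--     window = 0
--
--     # XOR of first window
--     for i in range(k):
--         window ^= arr[i]
--
--     ans = window
--
--     # Slide the window
--     for i in range(k, n):
--         window ^= arr[i]      # add new element
--         window ^= arr[i - k]  # remove outgoing element (XOR again)
--         ans = max(ans, window)
--
--     return ans
-- ===== SOURCE B (Python) =====
-- def max_xor_sliding_window(arr, k):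
--     n = len(arr)
--     if k > n:
--         return 0
--     prefix = [0]
--     for x in arr:
--         prefix.append(prefix[-1] ^ x)
--     return max(prefix[i + k] ^ prefix[i] for i in range(n - k + 1))
-- ===== Notes on version B (the rewrite author's own statement) =====
-- stated objective: alternative
-- what changed: Replaces A's incremental sliding-window XOR (seed window, then xor-in/xor-out while tracking a running max) by a prefix-XOR table prefix[i]=arr[0]^...^arr[i-1] and a single max over prefix[i+k]^prefix[i] for all window starts.
import Mathlib
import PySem

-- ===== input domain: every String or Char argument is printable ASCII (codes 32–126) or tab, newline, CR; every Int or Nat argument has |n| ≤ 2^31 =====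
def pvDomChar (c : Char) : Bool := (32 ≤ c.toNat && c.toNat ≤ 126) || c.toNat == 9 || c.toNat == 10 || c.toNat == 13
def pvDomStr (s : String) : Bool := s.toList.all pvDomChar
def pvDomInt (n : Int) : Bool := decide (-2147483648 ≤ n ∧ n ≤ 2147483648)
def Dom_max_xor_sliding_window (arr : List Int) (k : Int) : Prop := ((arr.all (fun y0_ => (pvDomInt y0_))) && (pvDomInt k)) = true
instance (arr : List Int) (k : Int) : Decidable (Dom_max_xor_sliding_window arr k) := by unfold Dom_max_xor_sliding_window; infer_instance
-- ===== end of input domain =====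

-- B replaces A's incremental sliding-window XOR by a prefix-XOR table and one maximum over
-- prefix[i+k]^prefix[i] (objective: alternative decomposition, same O(n) cost).

-- ===== PORT A =====
-- literal port of A; PySem.List.pyGetD _ _ 0 stands for arr[i], exact under Pre_ (all indices in range)
def max_xor_sliding_window (arr : List Int) (k : Int) : Int :=
  let n : Int := PySem.List.len arr
  if k > n then 0
  else
    let window : Int :=
      (PySem.List.pyRange 0 k 1).foldl
        (fun w i => PySem.Int.bxor w (PySem.List.pyGetD arr i 0)) 0
    let st :=
      (PySem.List.pyRange k n 1).foldl
        (fun (p : Int × Int) i =>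
          let w := PySem.Int.bxor (PySem.Int.bxor p.1 (PySem.List.pyGetD arr i 0))
                     (PySem.List.pyGetD arr (i - k) 0)
          (w, max p.2 w))
        (window, window)
    st.2

-- ===== PORT B =====
-- literal port of Source B: build the prefix-XOR list, then one maximum over the window values
def max_xor_sliding_window_alt (arr : List Int) (k : Int) : Int :=
  let n : Int := PySem.List.len arr
  if k > n then 0
  else
    let pfxs := arr.foldl
      (fun ps x => ps ++ [PySem.Int.bxor (PySem.List.pyGetD ps (-1) 0) x]) [0]
    let vals := (PySem.List.pyRange 0 (n - k + 1) 1).map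
      (fun i => PySem.Int.bxor (PySem.List.pyGetD pfxs (i + k) 0)
                  (PySem.List.pyGetD pfxs i 0))
    (PySem.List.max? vals (fun x => x)).getD 0

-- ===== PRECONDITION & SPEC =====
-- Pre_ excludes k < 0 only: there A always raises IndexError (the wraparound indexing of
-- range(k, n) runs past the end of arr), so A returns on exactly the inputs Pre_ admits.
def Pre_max_xor_sliding_window (_arr : List Int) (k : Int) : Prop := 0 ≤ k
instance (arr : List Int) (k : Int) : Decidable (Pre_max_xor_sliding_window arr k) := by
  unfold Pre_max_xor_sliding_window; infer_instance

def pvWitness_max_xor_sliding_window : List Int × Int := ([3, 1, 7, 2], 2)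

def Spec_max_xor_sliding_window (arr : List Int) (k : Int) (out : Int) : Prop :=
  out = max_xor_sliding_window_alt arr k
instance (arr : List Int) (k : Int) (out : Int) : Decidable (Spec_max_xor_sliding_window arr k out) := by
  unfold Spec_max_xor_sliding_window; infer_instance

-- ===== CLAIM (what is proved, stated in full; the proofs are below) =====
def Claim_equal_max_xor_sliding_window : Prop := ∀ (arr : List Int) (k : Int), Dom_max_xor_sliding_window arr k → Pre_max_xor_sliding_window arr k → Spec_max_xor_sliding_window arr k (max_xor_sliding_window arr k)

-- ===== LEMMAS AND PROOFS =====

-- PySem.Int.bxor is exactly Mathlib's Int.xor …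
theorem pvBxor_eq_xor (a b : Int) : PySem.Int.bxor a b = Int.xor a b := by
  cases a <;> cases b <;> simp [PySem.Int.bxor, Int.xor, Int.negSucc_eq] <;> omega

theorem pvIntXor_assoc (a b c : Int) :
    Int.xor (Int.xor a b) c = Int.xor a (Int.xor b c) := by
  cases a <;> cases b <;> cases c <;> simp [Int.xor, Nat.xor_assoc]

theorem pvBxor_assoc (a b c : Int) :
    PySem.Int.bxor (PySem.Int.bxor a b) c = PySem.Int.bxor a (PySem.Int.bxor b c) := by
  simp [pvBxor_eq_xor, pvIntXor_assoc]

-- rearranging four xored terms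
theorem pvXor4 (p q x y : Int) :
    PySem.Int.bxor (PySem.Int.bxor (PySem.Int.bxor p q) x) y
      = PySem.Int.bxor (PySem.Int.bxor p x) (PySem.Int.bxor q y) := by
  rw [pvBxor_assoc p q x, PySem.Int.bxor_comm q x, ← pvBxor_assoc p x q, pvBxor_assoc]

-- xor of the first t elements of arr
def pvPfx (arr : List Int) (t : Nat) : Int := (arr.take t).foldl PySem.Int.bxor 0

-- xor of the window of length kk starting at position j
def pvWin (arr : List Int) (kk j : Nat) : Int :=
  PySem.Int.bxor (pvPfx arr (j + kk)) (pvPfx arr j)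

-- running maximum of the first j+1 window values, as A's sliding loop maintains it
def pvBest (arr : List Int) (kk j : Nat) : Int :=
  ((List.range j).map (fun t => pvWin arr kk (t + 1))).foldl max (pvWin arr kk 0)

theorem pvPfx_succ (arr : List Int) (t : Nat) (h : t < arr.length) :
    pvPfx arr (t + 1) = PySem.Int.bxor (pvPfx arr t) arr[t] := by
  have htake : arr.take (t + 1) = arr.take t ++ [arr[t]] := by
    rw [List.take_add_one, List.getElem?_eq_getElem h]; rfl
  rw [pvPfx, pvPfx, htake, List.foldl_append, List.foldl_cons, List.foldl_nil]

theorem pvWin_zero (arr : List Int) (kk : Nat) : pvWin arr kk 0 = pvPfx arr kk := by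
  simp [pvWin, pvPfx]

-- A's first loop computes the prefix xor of the first t elements
theorem pvFirstLoop (arr : List Int) (t : Nat) (h : t ≤ arr.length) :
    (List.range t).foldl (fun w j => PySem.Int.bxor w (arr.getD j 0)) 0 = pvPfx arr t := by
  induction t with
  | zero => simp [pvPfx]
  | succ t ih =>
    rw [List.range_succ, List.foldl_append, ih (by omega),
      pvPfx_succ arr t (by omega), List.foldl_cons, List.foldl_nil,
      List.getD_eq_getElem arr 0 (by omega)]

-- sliding one step: xor in the entering element, xor out the leaving one
theorem pvWin_step (arr : List Int) (kk j : Nat) (h : j + kk < arr.length) :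
    PySem.Int.bxor (PySem.Int.bxor (pvWin arr kk j) arr[j + kk]) arr[j]
      = pvWin arr kk (j + 1) := by
  have h1 : j + 1 + kk = (j + kk) + 1 := by omega
  rw [pvWin, pvWin, h1, pvPfx_succ arr (j + kk) h, pvPfx_succ arr j (by omega), pvXor4]

-- invariant of A's sliding loop
theorem pvSlideLoop (arr : List Int) (kk m : Nat) (hlen : arr.length = kk + m)
    (j : Nat) (hj : j ≤ m) :
    (PySem.List.pyRange (kk : Int) ((kk : Int) + (j : Int)) 1).foldl
        (fun (p : Int × Int) i =>
          (PySem.Int.bxor (PySem.Int.bxor p.1 (PySem.List.pyGetD arr i 0))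
             (PySem.List.pyGetD arr (i - (kk : Int)) 0),
           max p.2 (PySem.Int.bxor (PySem.Int.bxor p.1 (PySem.List.pyGetD arr i 0))
             (PySem.List.pyGetD arr (i - (kk : Int)) 0))))
        (pvPfx arr kk, pvPfx arr kk)
      = (pvWin arr kk j, pvBest arr kk j) := by
  induction j with
  | zero =>
    rw [show ((kk : Int) + ((0 : Nat) : Int)) = (kk : Int) by push_cast; ring,
      PySem.List.pyRange_one_eq_nil (le_refl _), List.foldl_nil, pvBest, pvWin_zero]
    simp
  | succ j ih =>
    have hj' : j ≤ m := by omega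
    have hcast : ((kk : Int) + (((j + 1) : Nat) : Int)) = ((kk : Int) + (j : Int)) + 1 := by
      push_cast; ring
    rw [hcast, PySem.List.pyRange_one_succ_right (by omega), List.foldl_append,
      ih hj', List.foldl_cons, List.foldl_nil]
    have hi2 : ((kk : Int) + (j : Int) - (kk : Int)) = ((j : Nat) : Int) := by ring
    have hi1 : ((kk : Int) + (j : Int)) = (((kk + j) : Nat) : Int) := by push_cast; ring
    have hkj : kk + j < arr.length := by omega
    have hjlt : j < arr.length := by omega
    simp only [hi2]
    rw [hi1]
    simp only [PySem.List.pyGetD_natCast]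
    rw [List.getD_eq_getElem arr 0 hkj, List.getD_eq_getElem arr 0 hjlt]
    have hw : PySem.Int.bxor (PySem.Int.bxor (pvWin arr kk j) arr[kk + j]) arr[j]
        = pvWin arr kk (j + 1) := by
      have hswap : arr[kk + j] = arr[j + kk]'(by omega) := by congr 1; omega
      rw [hswap, pvWin_step arr kk j (by omega)]
    rw [hw]
    have hb : max (pvBest arr kk j) (pvWin arr kk (j + 1)) = pvBest arr kk (j + 1) := by
      simp [pvBest, List.range_succ]
    rw [hb]

-- the xor-scan that B's prefix loop produces (one entry per consumed element)
def pvScan : Int → List Int → List Int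
  | _, [] => []
  | acc, a :: t => PySem.Int.bxor acc a :: pvScan (PySem.Int.bxor acc a) t

-- B's prefix-building loop appends exactly the scan entries
theorem pvPrefixLoop (l : List Int) : ∀ (ps : List Int) (acc : Int),
    l.foldl (fun ps x => ps ++ [PySem.Int.bxor (PySem.List.pyGetD ps (-1) 0) x]) (ps ++ [acc])
      = ps ++ [acc] ++ pvScan acc l := by
  induction l with
  | nil => intro ps acc; simp [pvScan]
  | cons a t ih =>
    intro ps acc
    rw [List.foldl_cons, PySem.List.pyGetD_neg_one_append_singleton,
      ih (ps ++ [acc]) (PySem.Int.bxor acc a)]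
    simp [pvScan]

-- reading the scan list is the prefix xor
theorem pvScan_getD (l : List Int) : ∀ (acc : Int) (t : Nat), t ≤ l.length →
    (acc :: pvScan acc l).getD t 0 = (l.take t).foldl PySem.Int.bxor acc := by
  induction l with
  | nil =>
    intro acc t ht
    have ht0 : t = 0 := by simpa using ht
    subst ht0; simp
  | cons a rest ih =>
    intro acc t ht
    cases t with
    | zero => simp
    | succ t =>
      have := ih (PySem.Int.bxor acc a) t (by simpa using ht)
      simpa [pvScan] using this

theorem pvPrefix_getD (arr : List Int) (t : Nat) (h : t ≤ arr.length) :
    (arr.foldl (fun ps x => ps ++ [PySem.Int.bxor (PySem.List.pyGetD ps (-1) 0) x]) [0]).getD t 0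
      = pvPfx arr t := by
  have h0 : ([] : List Int) ++ [0] = [0] := rfl
  rw [← h0, pvPrefixLoop arr [] 0]
  simpa [pvPfx] using pvScan_getD arr 0 t h

-- ===== VERDICT (by name: the statement is the Claim_ definition above) =====
theorem max_xor_sliding_window_spec : Claim_equal_max_xor_sliding_window := by
  intro arr k _ hpre
  unfold Spec_max_xor_sliding_window max_xor_sliding_window max_xor_sliding_window_alt
  simp only [PySem.List.len_eq]
  by_cases hkn : k > (arr.length : Int)
  · simp [hkn]
  · simp only [hkn, if_false]
    rw [not_lt] at hkn
    obtain ⟨kk, rfl⟩ : ∃ kk : Nat, k = (kk : Int) := ⟨k.toNat, (Int.toNat_of_nonneg hpre).symm⟩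
    obtain ⟨m, hm⟩ : ∃ m : Nat, arr.length = kk + m := ⟨arr.length - kk, by omega⟩
    -- A's first loop is the prefix xor of the first kk elements
    have hA1 : (PySem.List.pyRange 0 (kk : Int) 1).foldl
        (fun w i => PySem.Int.bxor w (PySem.List.pyGetD arr i 0)) 0 = pvPfx arr kk := by
      rw [PySem.List.pyRange_one, List.foldl_map]
      simp only [Int.sub_zero, Int.toNat_natCast, Int.zero_add, PySem.List.pyGetD_natCast]
      exact pvFirstLoop arr kk (by omega)
    have hA2 := pvSlideLoop arr kk m hm m (le_refl m)
    -- B's value list is exactly the m+1 window xors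
    have hB1 : ((arr.length : Int) - (kk : Int) + 1) = (((m + 1) : Nat) : Int) := by
      rw [hm]; push_cast; ring
    set P := arr.foldl (fun ps x => ps ++ [PySem.Int.bxor (PySem.List.pyGetD ps (-1) 0) x]) [0]
      with hP
    have hBval : (PySem.List.pyRange 0 ((arr.length : Int) - (kk : Int) + 1) 1).map
        (fun i => PySem.Int.bxor (PySem.List.pyGetD P (i + (kk : Int)) 0)
          (PySem.List.pyGetD P i 0))
        = (List.range (m + 1)).map (fun j => pvWin arr kk j) := by
      rw [hB1, PySem.List.pyRange_one, List.map_map]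
      simp only [Int.sub_zero, Int.toNat_natCast]
      refine List.map_congr_left ?_
      intro j hj
      have hjm : j ≤ m := by simpa [Nat.lt_succ_iff] using List.mem_range.mp hj
      have hc2 : ((0 : Int) + (j : Int)) = ((j : Nat) : Int) := by ring
      simp only [Function.comp_apply, hc2]
      have hc1 : ((j : Int) + (kk : Int)) = (((j + kk) : Nat) : Int) := by push_cast; ring
      simp only [hc1, PySem.List.pyGetD_natCast]
      rw [hP, pvPrefix_getD arr (j + kk) (by omega), pvPrefix_getD arr j (by omega), pvWin]
    rw [hA1, hBval]
    have hmcast : ((arr.length : Int)) = (kk : Int) + (m : Int) := by rw [hm]; push_cast; ring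
    rw [hmcast, hA2]
    -- both sides are the maximum of the same m+1 window values
    rw [List.range_succ_eq_map, List.map_cons, List.map_map, PySem.List.max?_id_cons,
      Option.getD_some, List.foldl_map, pvBest, List.foldl_map]
    simp [Nat.succ_eq_add_one]
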